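-- pv_equiv track=rewrite | github.com/Emekk/DSA-in-Python-Solutions-to-Exercises | Creativity/c1.py | has_odd_prod_pair
-- ===== SOURCE A (Python) =====
-- import typing
--
-- def has_odd_prod_pair(data: typing.Iterable[int]) -> bool:
--     for left_num in data:
--         if left_num % 2 == 0:
--             continue
--         for right_num in data:
--             if right_num % 2 == 0 or left_num == right_num:
--                 continue
--             return True;
--     return False
-- ===== SOURCE B (Python) =====
-- def has_odd_prod_pair(data):
--     first = None
--     for x in data:
--         if x % 2 != 0:
--             if first is None:
--                 first = x
--             elif x != first:
--                 return True
--     return False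
-- ===== Notes on version B (the rewrite author's own statement) =====
-- stated objective: simpler
-- what changed: Single linear pass remembering the first odd value and returning True at the first odd element with a different value, replacing A's nested re-scan of the whole iterable for every odd element.
import Mathlib
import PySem

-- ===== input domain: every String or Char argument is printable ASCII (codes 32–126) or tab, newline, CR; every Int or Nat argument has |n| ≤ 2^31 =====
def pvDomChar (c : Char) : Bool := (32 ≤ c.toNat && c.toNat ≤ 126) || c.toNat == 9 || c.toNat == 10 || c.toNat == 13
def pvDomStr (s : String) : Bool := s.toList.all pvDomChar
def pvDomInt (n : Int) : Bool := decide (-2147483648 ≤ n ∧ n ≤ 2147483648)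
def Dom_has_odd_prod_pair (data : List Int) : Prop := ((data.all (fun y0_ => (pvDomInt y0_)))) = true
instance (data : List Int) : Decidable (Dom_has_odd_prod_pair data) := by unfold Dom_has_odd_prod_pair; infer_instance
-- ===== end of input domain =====

-- B replaces A's nested re-scan with one linear pass that remembers the first odd value (simpler single-loop structure; not measurably faster on the timed inputs).


-- ===== PORT A =====
-- inner 'for right_num in data' loop: returns true at the first odd right_num ≠ left_num
def pyInnerA (left_num : Int) : List Int → Bool
  | [] => false
  | r :: rs => if PySem.Int.mod r 2 = 0 ∨ left_num = r then pyInnerA left_num rs else true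

-- outer 'for left_num in data' loop over ls, re-scanning the full data each time
def pyOuterA (data : List Int) : List Int → Bool
  | [] => false
  | l :: ls => if PySem.Int.mod l 2 = 0 then pyOuterA data ls
               else if pyInnerA l data then true else pyOuterA data ls

def has_odd_prod_pair (data : List Int) : Bool := pyOuterA data data

-- ===== PORT B =====
-- single pass: first? is the first odd value seen so far (None before one is seen)
def bLoop : Option Int → List Int → Bool
  | _, [] => false
  | first?, x :: xs =>
    if PySem.Int.mod x 2 ≠ 0 then
      match first? with
      | none => bLoop (some x) xs
      | some f => if x ≠ f then true else bLoop (some f) xs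
    else bLoop first? xs

def has_odd_prod_pair_alt (data : List Int) : Bool := bLoop none data

-- ===== PRECONDITION & SPEC =====
def Spec_has_odd_prod_pair (data : List Int) (out : Bool) : Prop := out = has_odd_prod_pair_alt data
instance (data : List Int) (out : Bool) : Decidable (Spec_has_odd_prod_pair data out) := by unfold Spec_has_odd_prod_pair; infer_instance

-- ===== CLAIM (what is proved, stated in full; the proofs are below) =====
def Claim_equal_has_odd_prod_pair : Prop := ∀ (data : List Int), Dom_has_odd_prod_pair data → Spec_has_odd_prod_pair data (has_odd_prod_pair data)

-- ===== LEMMAS AND PROOFS =====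

theorem innerA_iff (l : Int) (xs : List Int) :
    pyInnerA l xs = true ↔ ∃ r ∈ xs, PySem.Int.mod r 2 ≠ 0 ∧ l ≠ r := by
  induction xs with
  | nil => simp [pyInnerA]
  | cons r rs ih =>
    simp only [pyInnerA]
    split_ifs with h
    · simp only [List.mem_cons]
      constructor
      · rintro hx
        obtain ⟨y, hy, hodd, hne⟩ := ih.mp hx
        exact ⟨y, Or.inr hy, hodd, hne⟩
      · rintro ⟨y, hy, hodd, hne⟩
        rcases hy with rfl | hy
        · tauto
        · exact ih.mpr ⟨y, hy, hodd, hne⟩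
    · push Not at h
      simp only [List.mem_cons]
      exact ⟨fun _ => ⟨r, Or.inl rfl, h.1, h.2⟩, fun _ => trivial⟩

theorem outerA_iff (data : List Int) (ls : List Int) :
    pyOuterA data ls = true ↔ ∃ l ∈ ls, PySem.Int.mod l 2 ≠ 0 ∧ pyInnerA l data = true := by
  induction ls with
  | nil => simp [pyOuterA]
  | cons l ls ih =>
    simp only [pyOuterA]
    split_ifs with h1 h2
    · rw [ih]; simp only [List.mem_cons]
      constructor
      · rintro ⟨y, hy, hh⟩; exact ⟨y, Or.inr hy, hh⟩
      · rintro ⟨y, hy, hodd, hin⟩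
        rcases hy with rfl | hy
        · exact absurd h1 hodd
        · exact ⟨y, hy, hodd, hin⟩
    · simp only [List.mem_cons]
      exact ⟨fun _ => ⟨l, Or.inl rfl, h1, h2⟩, fun _ => trivial⟩
    · rw [ih]; simp only [List.mem_cons]
      constructor
      · rintro ⟨y, hy, hh⟩; exact ⟨y, Or.inr hy, hh⟩
      · rintro ⟨y, hy, hodd, hin⟩
        rcases hy with rfl | hy
        · exact absurd hin h2
        · exact ⟨y, hy, hodd, hin⟩

theorem bSome_iff (f : Int) (xs : List Int) :
    bLoop (some f) xs = true ↔ ∃ x ∈ xs, PySem.Int.mod x 2 ≠ 0 ∧ x ≠ f := by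
  induction xs with
  | nil => simp [bLoop]
  | cons x xs ih =>
    simp only [bLoop]
    split_ifs with h1 h2
    · simp only [List.mem_cons]
      exact ⟨fun _ => ⟨x, Or.inl rfl, h1, h2⟩, fun _ => trivial⟩
    · push Not at h2; subst h2
      rw [ih]; simp only [List.mem_cons]
      constructor
      · rintro ⟨y, hy, hh⟩; exact ⟨y, Or.inr hy, hh⟩
      · rintro ⟨y, hy, hodd, hne⟩
        rcases hy with rfl | hy
        · exact absurd rfl hne
        · exact ⟨y, hy, hodd, hne⟩
    · push Not at h1
      rw [ih]; simp only [List.mem_cons]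
      constructor
      · rintro ⟨y, hy, hh⟩; exact ⟨y, Or.inr hy, hh⟩
      · rintro ⟨y, hy, hodd, hne⟩
        rcases hy with rfl | hy
        · exact absurd h1 hodd
        · exact ⟨y, hy, hodd, hne⟩

theorem bNone_iff (xs : List Int) :
    bLoop none xs = true ↔
      ∃ x ∈ xs, ∃ y ∈ xs, PySem.Int.mod x 2 ≠ 0 ∧ PySem.Int.mod y 2 ≠ 0 ∧ x ≠ y := by
  induction xs with
  | nil => simp [bLoop]
  | cons a xs ih =>
    simp only [bLoop]
    split_ifs with h1
    · rw [bSome_iff]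
      simp only [List.mem_cons]
      constructor
      · rintro ⟨y, hy, hodd, hne⟩
        exact ⟨a, Or.inl rfl, y, Or.inr hy, h1, hodd, fun h => hne h.symm⟩
      · rintro ⟨x, hx, y, hy, hox, hoy, hxy⟩
        rcases hx with rfl | hx
        · rcases hy with rfl | hy
          · exact absurd rfl hxy
          · exact ⟨y, hy, hoy, fun h => hxy h.symm⟩
        · by_cases hxa : x = a
          · subst hxa
            rcases hy with rfl | hy
            · exact absurd rfl hxy
            · exact ⟨y, hy, hoy, fun h => hxy h.symm⟩
          · exact ⟨x, hx, hox, hxa⟩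
    · push Not at h1
      rw [ih]
      simp only [List.mem_cons]
      constructor
      · rintro ⟨x, hx, y, hy, hh⟩; exact ⟨x, Or.inr hx, y, Or.inr hy, hh⟩
      · rintro ⟨x, hx, y, hy, hox, hoy, hxy⟩
        rcases hx with rfl | hx
        · exact absurd h1 hox
        · rcases hy with rfl | hy
          · exact absurd h1 hoy
          · exact ⟨x, hx, y, hy, hox, hoy, hxy⟩

theorem a_iff (data : List Int) :
    has_odd_prod_pair data = true ↔
      ∃ x ∈ data, ∃ y ∈ data, PySem.Int.mod x 2 ≠ 0 ∧ PySem.Int.mod y 2 ≠ 0 ∧ x ≠ y := by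
  unfold has_odd_prod_pair
  rw [outerA_iff]
  constructor
  · rintro ⟨l, hl, hodd, hin⟩
    obtain ⟨r, hr, hro, hne⟩ := (innerA_iff l data).mp hin
    exact ⟨l, hl, r, hr, hodd, hro, hne⟩
  · rintro ⟨x, hx, y, hy, hox, hoy, hxy⟩
    exact ⟨x, hx, hox, (innerA_iff x data).mpr ⟨y, hy, hoy, hxy⟩⟩

-- ===== VERDICT (by name: the statement is the Claim_ definition above) =====
theorem has_odd_prod_pair_spec : Claim_equal_has_odd_prod_pair := by
  intro data _
  unfold Spec_has_odd_prod_pair has_odd_prod_pair_alt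
  rw [Bool.eq_iff_iff, ← has_odd_prod_pair_alt, a_iff]
  exact (bNone_iff data).symm
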